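-- pv_equiv track=rewrite | github.com/dashayvs/coursework_projector | recipe_recommendation/feature_eng.py | filter_out_combined_categories
-- ===== SOURCE A (Python) =====
-- from itertools import combinations
--
-- def filter_out_combined_categories(categories: set[str]) -> set[str]:
--     found_combinations = set()
--
--     # Generate and check combinations
--     for word1, word2 in combinations(categories, 2):
--         combined1 = f"{word1} {word2}"
--         combined2 = f"{word2} {word1}"
--
--         if combined1 in categories:
--             found_combinations.add(combined1)
--         if combined2 in categories:
--             found_combinations.add(combined2)
--
--     return categories - found_combinations
-- ===== SOURCE B (Python) =====
-- def filter_out_combined_categories(categories: set[str]) -> set[str]: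
--     def is_combined(c: str) -> bool:
--         # c is a concatenation "left right" iff some space splits it into
--         # two distinct members of the category set
--         return any(
--             ch == ' '
--             and c[:i] in categories
--             and c[i + 1:] in categories
--             and c[:i] != c[i + 1:]
--             for i, ch in enumerate(c)
--         )
--
--     return {c for c in categories if not is_combined(c)}
-- ===== Notes on version B (the rewrite author's own statement) =====
-- stated objective: faster
-- what changed: Instead of generating all O(n^2) pairs of categories and probing their two concatenations, B scans each category once, tries every space position as a split point and looks the two halves up in the set.
import Mathlib
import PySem

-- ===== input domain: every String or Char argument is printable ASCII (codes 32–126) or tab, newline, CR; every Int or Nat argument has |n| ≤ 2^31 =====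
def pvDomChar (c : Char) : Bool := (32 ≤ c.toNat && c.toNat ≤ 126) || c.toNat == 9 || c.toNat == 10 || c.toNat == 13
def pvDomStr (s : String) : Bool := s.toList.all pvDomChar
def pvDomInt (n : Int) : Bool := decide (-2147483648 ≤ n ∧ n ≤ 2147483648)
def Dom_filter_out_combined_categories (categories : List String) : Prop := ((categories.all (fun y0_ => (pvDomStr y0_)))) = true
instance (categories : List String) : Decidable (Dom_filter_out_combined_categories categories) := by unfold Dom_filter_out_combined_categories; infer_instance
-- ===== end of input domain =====

-- B replaces A's O(n^2) pair-generation pass by a per-category split-at-each-space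
-- lookup pass (objective: faster; return value compared as a set of strings).


-- ===== PORT A =====
-- f"{w1} {w2}" — string concatenation, exact, done on the character lists
def fccJoin (w1 w2 : String) : String := String.ofList (w1.toList ++ ' ' :: w2.toList)

-- body of A's loop over combinations(categories, 2)
def fccStep (categories : List String) (acc : PySem.Set String) (pr : List String) : PySem.Set String :=
  match pr with
  | [word1, word2] =>
    let combined1 := fccJoin word1 word2
    let combined2 := fccJoin word2 word1
    let acc1 := if categories.contains combined1 then PySem.Set.add acc combined1 else acc
    if categories.contains combined2 then PySem.Set.add acc1 combined2 else acc1
  | _ => acc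

def filter_out_combined_categories (categories : List String) : List String :=
  let found := (PySem.List.combinations categories 2).foldl (fccStep categories) PySem.Set.empty
  PySem.Set.diff categories found

-- ===== PORT B =====
-- is_combined(c): some space position splits c into two distinct members.
-- c[:i] / c[i+1:] with 0 ≤ i < len(c) are exactly take i / drop (i+1).
def fccIsCombined (categories : List String) (c : String) : Bool :=
  (PySem.List.enumerate c.toList).any (fun p =>
    p.2 == ' '
    && categories.contains (String.ofList (c.toList.take p.1.toNat))
    && categories.contains (String.ofList (c.toList.drop (p.1.toNat + 1)))
    && String.ofList (c.toList.take p.1.toNat) != String.ofList (c.toList.drop (p.1.toNat + 1)))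

def filter_out_combined_categories_alt (categories : List String) : List String :=
  categories.filter (fun c => !fccIsCombined categories c)

-- ===== PRECONDITION & SPEC =====
-- The Python argument is a set[str]; under the type convention the list holds its
-- DISTINCT elements, so Pre_ only states that encoding (no input A accepts is excluded).
def Pre_filter_out_combined_categories (categories : List String) : Prop := categories.Nodup
instance (categories : List String) : Decidable (Pre_filter_out_combined_categories categories) := by unfold Pre_filter_out_combined_categories; infer_instance
def pvWitness_filter_out_combined_categories : List String := ["a", "b", "a b", "c"]

def Spec_filter_out_combined_categories (categories : List String) (out : List String) : Prop := out = filter_out_combined_categories_alt categories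
instance (categories : List String) (out : List String) : Decidable (Spec_filter_out_combined_categories categories out) := by unfold Spec_filter_out_combined_categories; infer_instance

-- ===== CLAIM (what is proved, stated in full; the proofs are below) =====
def Claim_equal_filter_out_combined_categories : Prop := ∀ (categories : List String), Dom_filter_out_combined_categories categories → Pre_filter_out_combined_categories categories → Spec_filter_out_combined_categories categories (filter_out_combined_categories categories)

-- ===== LEMMAS AND PROOFS =====

-- the removal condition both programs implement
def fccRem (categories : List String) (c : String) : Prop :=
  ∃ a b, a ∈ categories ∧ b ∈ categories ∧ a ≠ b ∧ c = fccJoin a b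

lemma mem_fccStep (cats : List String) (acc : PySem.Set String) (w1 w2 c : String) :
    c ∈ fccStep cats acc [w1, w2] ↔
      c ∈ acc ∨ (c ∈ cats ∧ (c = fccJoin w1 w2 ∨ c = fccJoin w2 w1)) := by
  simp only [fccStep]
  split_ifs with h1 h2 h2 <;> simp_all [PySem.Set.mem_add]
  · constructor
    · rintro ((h | rfl) | rfl)
      · exact Or.inl h
      · exact Or.inr ⟨h2, Or.inl rfl⟩
      · exact Or.inr ⟨h1, Or.inr rfl⟩
    · rintro (h | ⟨hc, rfl | rfl⟩)
      · exact Or.inl (Or.inl h)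
      · exact Or.inl (Or.inr rfl)
      · exact Or.inr rfl
  · constructor
    · rintro (h | rfl)
      · exact Or.inl h
      · exact Or.inr ⟨h1, Or.inr rfl⟩
    · rintro (h | ⟨hc, rfl | rfl⟩)
      · exact Or.inl h
      · exact absurd hc h2
      · exact Or.inr rfl
  · constructor
    · rintro (h | rfl)
      · exact Or.inl h
      · exact Or.inr ⟨h2, Or.inl rfl⟩
    · rintro (h | ⟨hc, rfl | rfl⟩)
      · exact Or.inl h
      · exact Or.inr rfl
      · exact absurd hc h1
  · rintro hc (rfl | rfl)
    · exact absurd hc h2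
    · exact absurd hc h1

lemma mem_foldl_fccStep (cats : List String) (prs : List (List String))
    (h2 : ∀ pr ∈ prs, pr.length = 2) (acc : PySem.Set String) (c : String) :
    c ∈ prs.foldl (fccStep cats) acc ↔
      c ∈ acc ∨ ∃ w1 w2, [w1, w2] ∈ prs ∧ c ∈ cats ∧ (c = fccJoin w1 w2 ∨ c = fccJoin w2 w1) := by
  induction prs generalizing acc with
  | nil => simp
  | cons pr t ih =>
    obtain ⟨w1, w2, rfl⟩ := List.length_eq_two.mp (h2 pr (by simp))
    rw [List.foldl_cons, ih (fun q hq => h2 q (by simp [hq])), mem_fccStep]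
    constructor
    · rintro ((h | h) | ⟨a, b, hm, hc, ho⟩)
      · exact Or.inl h
      · exact Or.inr ⟨w1, w2, by simp, h.1, h.2⟩
      · exact Or.inr ⟨a, b, by simp [hm], hc, ho⟩
    · rintro (h | ⟨a, b, hm, hc, ho⟩)
      · exact Or.inl (Or.inl h)
      · rcases List.mem_cons.mp hm with heq | hmt
        · obtain ⟨rfl, rfl⟩ : a = w1 ∧ b = w2 := by
            simpa using heq
          exact Or.inl (Or.inr ⟨hc, ho⟩)
        · exact Or.inr ⟨a, b, hmt, hc, ho⟩

lemma pair_sublist_of_mem {l : List String} {a b : String}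
    (ha : a ∈ l) (hb : b ∈ l) (hne : a ≠ b) :
    [a, b].Sublist l ∨ [b, a].Sublist l := by
  induction l with
  | nil => simp at ha
  | cons x t ih =>
    by_cases hax : a = x
    · subst hax
      have hbt : b ∈ t := by
        rcases List.mem_cons.mp hb with h | h
        · exact absurd h.symm hne
        · exact h
      exact Or.inl ((List.singleton_sublist.mpr hbt).cons₂ a)
    · by_cases hbx : b = x
      · subst hbx
        have hat : a ∈ t := by
          rcases List.mem_cons.mp ha with h | h
          · exact absurd h hax
          · exact h
        exact Or.inr ((List.singleton_sublist.mpr hat).cons₂ b)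
      · have hat : a ∈ t := by
          rcases List.mem_cons.mp ha with h | h
          · exact absurd h hax
          · exact h
        have hbt : b ∈ t := by
          rcases List.mem_cons.mp hb with h | h
          · exact absurd h hbx
          · exact h
        rcases ih hat hbt with h | h
        · exact Or.inl (h.cons x)
        · exact Or.inr (h.cons x)

-- A removes c (c ∈ categories) iff fccRem categories c
lemma found_iff (cats : List String) (hNd : cats.Nodup) (c : String) (hc : c ∈ cats) :
    (c ∈ (PySem.List.combinations cats 2).foldl (fccStep cats) PySem.Set.empty) ↔
      fccRem cats c := by
  rw [mem_foldl_fccStep cats _ (fun pr hpr => PySem.List.length_of_mem_combinations hpr) _ c]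
  simp only [PySem.Set.empty, List.not_mem_nil, false_or]
  constructor
  · rintro ⟨w1, w2, hmem, _, ho⟩
    have hsub : [w1, w2].Sublist cats := (PySem.List.mem_combinations_iff _ _ _ |>.mp hmem).1
    have h1 : w1 ∈ cats := hsub.subset (by simp)
    have h2 : w2 ∈ cats := hsub.subset (by simp)
    have hne : w1 ≠ w2 := by
      simpa using hsub.nodup hNd
    rcases ho with rfl | rfl
    · exact ⟨w1, w2, h1, h2, hne, rfl⟩
    · exact ⟨w2, w1, h2, h1, hne.symm, rfl⟩
  · rintro ⟨a, b, ha, hb, hne, rfl⟩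
    rcases pair_sublist_of_mem ha hb hne with hs | hs
    · exact ⟨a, b, (PySem.List.mem_combinations_iff _ _ _).mpr ⟨hs, rfl⟩, hc, Or.inl rfl⟩
    · exact ⟨b, a, (PySem.List.mem_combinations_iff _ _ _).mpr ⟨hs, rfl⟩, hc, Or.inr rfl⟩

-- B removes c iff fccRem categories c
lemma isCombined_iff (cats : List String) (c : String) :
    fccIsCombined cats c = true ↔ fccRem cats c := by
  simp only [fccIsCombined, List.any_eq_true]
  constructor
  · rintro ⟨p, hp, hpred⟩
    obtain ⟨k, hk, rfl⟩ := (PySem.List.mem_enumerate_iff _ _ _).mp hp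
    simp only [Bool.and_eq_true, beq_iff_eq, bne_iff_ne, ne_eq] at hpred
    obtain ⟨⟨⟨hsp, hl⟩, hr⟩, hne⟩ := hpred
    have hkn : ((0 : Int) + (k : Int)).toNat = k := by omega
    rw [hkn] at hl hr hne
    refine ⟨String.ofList (c.toList.take k), String.ofList (c.toList.drop (k + 1)),
      List.contains_iff_mem.mp hl, List.contains_iff_mem.mp hr, hne, ?_⟩
    have hsplit : c.toList = c.toList.take k ++ ' ' :: c.toList.drop (k + 1) := by
      conv_lhs => rw [← List.take_append_drop k c.toList]
      congr 1
      rw [← List.getElem_cons_drop hk, hsp]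
    simp only [fccJoin, String.toList_ofList]
    rw [← hsplit, String.ofList_toList]
  · rintro ⟨a, b, ha, hb, hne, rfl⟩
    have hcl : (fccJoin a b).toList = a.toList ++ ' ' :: b.toList := by
      simp [fccJoin]
    set k := a.toList.length with hkdef
    have hk : k < (fccJoin a b).toList.length := by
      rw [hcl, List.length_append, List.length_cons]; omega
    refine ⟨((0 : Int) + (k : Int), (fccJoin a b).toList[k]), ?_, ?_⟩
    · exact (PySem.List.mem_enumerate_iff _ _ _).mpr ⟨k, hk, rfl⟩
    · have hkn : ((0 : Int) + (k : Int)).toNat = k := by omega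
      have htake : (fccJoin a b).toList.take k = a.toList := by
        rw [hcl, List.take_left]
      have hdrop : (fccJoin a b).toList.drop (k + 1) = b.toList := by
        rw [hcl, ← List.drop_drop, List.drop_left, List.drop_one, List.tail_cons]
      have hget : (fccJoin a b).toList[k] = ' ' := by
        rw [List.getElem_of_eq hcl]
        simp [hkdef]
      simp only [hkn, htake, hdrop, hget, String.ofList_toList, Bool.and_eq_true,
        beq_iff_eq, bne_iff_ne, ne_eq]
      refine ⟨⟨⟨by trivial, List.contains_iff_mem.mpr ha⟩, List.contains_iff_mem.mpr hb⟩, hne⟩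

-- ===== VERDICT (by name: the statement is the Claim_ definition above) =====
theorem filter_out_combined_categories_spec : Claim_equal_filter_out_combined_categories := by
  intro categories _ hNd
  unfold Spec_filter_out_combined_categories
  unfold filter_out_combined_categories filter_out_combined_categories_alt
  simp only [PySem.Set.diff, PySem.Set.contains]
  refine List.filter_congr ?_
  intro c hc
  have key : (c ∈ (PySem.List.combinations categories 2).foldl (fccStep categories) ([] : List String))
      ↔ fccIsCombined categories c = true := by
    simpa [PySem.Set.empty] using (found_iff categories hNd c hc).trans (isCombined_iff categories c).symm
  cases hb : fccIsCombined categories c <;>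
    simp [List.contains_eq_mem, key, hb]
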